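-- pv_equiv track=rewrite | github.com/goodeny/Paging-System | card.py | calc
-- ===== SOURCE A (Python) =====
-- def calc(n1, n2):
--     f = []
--     g = []
--     final = []
--     f.append(25)
--     g.append(25)
--     n = n1
--     n2 = n2
--     for i in range(8):
--         if i < 4:
--             n += 164
--             f.append(n)
--         else:
--             n2 += 164
--             g.append(n2)
--     final.append(f)
--     final.append(g)
--
--     return final
-- ===== SOURCE B (Python) =====
-- def calc(n1, n2):
--     def row(n, k):
--         if k == 0:
--             return []
--         return [n + 164] + row(n + 164, k - 1)
--     f = [25] + row(n1, 4)
--     d = n2 - n1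
--     g = [25] + [x + d for x in f[1:]]
--     return [f, g]
-- ===== Notes on version B (the rewrite author's own statement) =====
-- stated objective: alternative
-- what changed: Builds the first row with a recursive helper threading the running value, then derives the second row from the first by an elementwise shift of n2-n1, instead of one range(8) loop branching on i<4 with two accumulators.
import Mathlib
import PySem

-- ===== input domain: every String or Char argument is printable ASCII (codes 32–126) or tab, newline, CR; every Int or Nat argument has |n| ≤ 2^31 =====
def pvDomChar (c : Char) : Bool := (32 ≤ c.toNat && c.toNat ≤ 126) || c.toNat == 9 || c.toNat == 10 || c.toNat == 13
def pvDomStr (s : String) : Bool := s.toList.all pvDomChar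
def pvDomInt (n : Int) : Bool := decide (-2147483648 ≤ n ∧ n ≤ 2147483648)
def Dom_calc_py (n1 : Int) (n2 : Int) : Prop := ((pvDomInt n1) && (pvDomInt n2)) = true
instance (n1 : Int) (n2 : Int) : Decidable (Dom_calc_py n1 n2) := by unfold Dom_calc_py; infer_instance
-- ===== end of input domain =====

-- B builds the first row with a recursive helper and derives the second row by shifting the first (objective: alternative).
-- ===== PORT A =====
-- loop body of A: state (n, m, f, g); branch on i < 4 as in the Python
def calcStep (st : Int × Int × List Int × List Int) (i : Int) : Int × Int × List Int × List Int :=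
  let (n, m, f, g) := st
  if i < 4 then (n + 164, m, f ++ [n + 164], g)
  else (n, m + 164, f, g ++ [m + 164])

def calc_py (n1 : Int) (n2 : Int) : List (List Int) :=
  let f : List Int := [] ++ [25]
  let g : List Int := [] ++ [25]
  let st := (PySem.List.pyRange 0 8 1).foldl calcStep (n1, n2, f, g)
  ([] : List (List Int)) ++ [st.2.2.1] ++ [st.2.2.2]

-- ===== PORT B =====
def calcRow (n : Int) (k : Nat) : List Int :=
  match k with
  | 0 => []
  | k + 1 => [n + 164] ++ calcRow (n + 164) k

def calc_py_alt (n1 : Int) (n2 : Int) : List (List Int) :=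
  let f := [25] ++ calcRow n1 4
  let d := n2 - n1
  let g := [25] ++ (PySem.List.slice f (some 1) none).map (fun x => x + d)
  [f, g]

-- ===== PRECONDITION & SPEC =====
def Spec_calc_py (n1 : Int) (n2 : Int) (out : List (List Int)) : Prop := out = calc_py_alt n1 n2
instance (n1 : Int) (n2 : Int) (out : List (List Int)) : Decidable (Spec_calc_py n1 n2 out) := by unfold Spec_calc_py; infer_instance

-- ===== CLAIM =====
def Claim_equal_calc_py : Prop := ∀ (n1 : Int) (n2 : Int), Dom_calc_py n1 n2 → Spec_calc_py n1 n2 (calc_py n1 n2)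

-- ===== LEMMAS AND PROOFS =====

-- ===== VERDICT =====
theorem calc_py_spec : Claim_equal_calc_py := by
  intro n1 n2 _
  show calc_py n1 n2 = calc_py_alt n1 n2
  simp [calc_py, calc_py_alt, calcStep, calcRow, PySem.List.pyRange, List.range_succ,
        PySem.List.slice_from_one]
  ring_nf
  simp
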